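-- pv_equiv track=rewrite | github.com/Jan21/Ricochet | model.py | get_nodes_along_edge
-- ===== SOURCE A (Python) =====
-- def get_nodes_along_edge(edge):
--     # TODO add possible stops from along the edge
--     if abs(edge[0]-edge[1]) >= 32: # vertical edge
--         center = range(min(edge),max(edge)+1,32)
--         before = list(range(min(edge)-32,max(edge)-31,32))
--         after = list(range(min(edge)+32,max(edge)+33,32))
--     else: # horizontal
--         before = list(range(min(edge)-1,max(edge)))
--         center = range(min(edge),max(edge)+1)
--         after = list(range(min(edge) + 1, max(edge)+2))
--     last = [max(edge) for i in range(len(center))]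
--     first = [min(edge) for i in range(len(center))]
--     first[0],first[-1],last[0],last[-1],before[0],before[-1],after[0],after[-1]=-1,-1,-1,-1,-1,-1,-1,-1
--     zipped = [tuple(t) for t in zip(center,before,after,first,last)]
--     #zipped[0][1:],zipped[-1][1:] = [-1,-1,-1,-1],[-1,-1,-1,-1]
--     return zipped
-- ===== SOURCE B (Python) =====
-- def get_nodes_along_edge(edge):
--     lo, hi = min(edge), max(edge)
--     step = 32 if abs(edge[0] - edge[1]) >= 32 else 1
--     centers = list(range(lo, hi + 1, step))
--     n = len(centers)
--     out = []
--     for i, c in enumerate(centers):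
--         if i == 0 or i == n - 1:
--             out.append((c, -1, -1, -1, -1))
--         else:
--             out.append((c, c - step, c + step, lo, hi))
--     return out
-- ===== Notes on version B (the rewrite author's own statement) =====
-- stated objective: simpler
-- what changed: A builds five parallel lists (three ranges plus two constant lists), overwrites the boundary cells of four of them at indices 0 and -1, and zips them; B makes a single enumerate pass over the centers, emitting each 5-tuple directly with a boundary test i==0 or i==n-1.
import Mathlib
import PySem

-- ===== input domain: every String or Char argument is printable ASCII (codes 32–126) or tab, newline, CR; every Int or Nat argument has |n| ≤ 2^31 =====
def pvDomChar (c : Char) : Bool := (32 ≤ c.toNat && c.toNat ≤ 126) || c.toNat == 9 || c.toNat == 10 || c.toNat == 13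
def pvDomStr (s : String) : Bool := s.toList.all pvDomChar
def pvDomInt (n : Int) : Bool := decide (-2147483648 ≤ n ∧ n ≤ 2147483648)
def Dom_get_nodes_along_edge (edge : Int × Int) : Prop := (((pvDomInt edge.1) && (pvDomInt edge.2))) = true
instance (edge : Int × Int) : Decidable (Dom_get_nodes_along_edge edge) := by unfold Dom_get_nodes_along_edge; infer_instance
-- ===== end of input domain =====

-- B replaces A's five parallel lists + boundary-index overrides + zip by one direct
-- enumerate pass that emits each 5-tuple immediately (objective: simpler).


-- ===== PORT A =====
-- the code after A's if/else: build last/first, overwrite the boundary cells of all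
-- four side lists at indices 0 and -1, then zip the five lists
def pvATail (center before after : List Int) (lo hi : Int) :
    List (Int × Int × Int × Int × Int) :=
  let last := (List.range center.length).map (fun _ => hi)
  let first := (List.range center.length).map (fun _ => lo)
  let first := PySem.List.pySetD (PySem.List.pySetD first 0 (-1)) (-1) (-1)
  let last := PySem.List.pySetD (PySem.List.pySetD last 0 (-1)) (-1) (-1)
  let before := PySem.List.pySetD (PySem.List.pySetD before 0 (-1)) (-1) (-1)
  let after := PySem.List.pySetD (PySem.List.pySetD after 0 (-1)) (-1) (-1)
  center.zip (before.zip (after.zip (first.zip last)))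

def get_nodes_along_edge (edge : Int × Int) : List (Int × Int × Int × Int × Int) :=
  let lo := min edge.1 edge.2
  let hi := max edge.1 edge.2
  if 32 ≤ (edge.1 - edge.2).natAbs then
    pvATail (PySem.List.pyRange lo (hi + 1) 32)
      (PySem.List.pyRange (lo - 32) (hi - 31) 32)
      (PySem.List.pyRange (lo + 32) (hi + 33) 32) lo hi
  else
    pvATail (PySem.List.pyRange lo (hi + 1) 1)
      (PySem.List.pyRange (lo - 1) hi 1)
      (PySem.List.pyRange (lo + 1) (hi + 2) 1) lo hi

-- ===== PORT B =====
def get_nodes_along_edge_alt (edge : Int × Int) : List (Int × Int × Int × Int × Int) :=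
  let lo := min edge.1 edge.2
  let hi := max edge.1 edge.2
  let step : Int := if 32 ≤ (edge.1 - edge.2).natAbs then 32 else 1
  let centers := PySem.List.pyRange lo (hi + 1) step
  let n : Int := centers.length
  (PySem.List.enumerate centers 0).foldl
    (fun out ic =>
      out ++ [if ic.1 = 0 ∨ ic.1 = n - 1 then (ic.2, -1, -1, -1, -1)
              else (ic.2, ic.2 - step, ic.2 + step, lo, hi)]) []

-- ===== PRECONDITION & SPEC =====
def Spec_get_nodes_along_edge (edge : Int × Int) (out : List (Int × Int × Int × Int × Int)) : Prop := out = get_nodes_along_edge_alt edge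
instance (edge : Int × Int) (out : List (Int × Int × Int × Int × Int)) : Decidable (Spec_get_nodes_along_edge edge out) := by unfold Spec_get_nodes_along_edge; infer_instance

-- ===== CLAIM (what is proved, stated in full; the proofs are below) =====
def Claim_equal_get_nodes_along_edge : Prop := ∀ (edge : Int × Int), Dom_get_nodes_along_edge edge → Spec_get_nodes_along_edge edge (get_nodes_along_edge edge)

-- ===== LEMMAS AND PROOFS =====

-- common closed form both sides are reduced to
def pvModel (lo hi s : Int) (N : Nat) : List (Int × Int × Int × Int × Int) :=
  (List.range N).map (fun k : Nat =>
    if k = 0 ∨ k = N - 1 then ((lo + s * (k : Int)), -1, -1, -1, -1)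
    else (lo + s * (k : Int), lo + s * (k : Int) - s, lo + s * (k : Int) + s, lo, hi))

theorem pySetD_neg_one {α : Type} (xs : List α) (v : α) (h : xs ≠ []) :
    PySem.List.pySetD xs (-1) v = xs.set (xs.length - 1) v := by
  have hl : 1 ≤ xs.length := List.length_pos_iff.mpr h
  have hidx : PySem.List.pyIdx? xs.length (-1) = some (xs.length - 1) := by
    rw [PySem.List.pyIdx?, if_neg (by omega), if_pos (by omega)]
    norm_num
  simp [PySem.List.pySetD, PySem.List.pySet?, hidx]

theorem pvN_pos (lo hi s : Int) (hs : 0 < s) (hle : lo ≤ hi) :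
    1 ≤ ((hi + 1 - lo + s - 1) / s).toNat := by
  have h1 : (1 : Int) ≤ (hi + 1 - lo + s - 1) / s := by
    rw [Int.le_ediv_iff_mul_le hs]; omega
  omega

theorem pvATail_eq (lo hi s b2 b3 : Int) (hs : 0 < s) (hle : lo ≤ hi)
    (hb2 : b2 = hi - s + 1) (hb3 : b3 = hi + s + 1) :
    pvATail (PySem.List.pyRange lo (hi + 1) s)
      (PySem.List.pyRange (lo - s) b2 s)
      (PySem.List.pyRange (lo + s) b3 s) lo hi
    = pvModel lo hi s ((hi + 1 - lo + s - 1) / s).toNat := by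
  subst hb2 hb3
  set N : Nat := ((hi + 1 - lo + s - 1) / s).toNat with hN
  have hN1 : 1 ≤ N := pvN_pos lo hi s hs hle
  have hc : PySem.List.pyRange lo (hi + 1) s
      = (List.range N).map (fun k : Nat => lo + s * (k : Int)) := by
    rw [PySem.List.pyRange_of_pos _ _ hs, if_pos (by omega)]
  have hb : PySem.List.pyRange (lo - s) (hi - s + 1) s
      = (List.range N).map (fun k : Nat => lo - s + s * (k : Int)) := by
    rw [PySem.List.pyRange_of_pos _ _ hs, if_pos (by omega)]
    have : (hi - s + 1 - (lo - s) + s - 1) = (hi + 1 - lo + s - 1) := by ring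
    rw [this]
  have ha : PySem.List.pyRange (lo + s) (hi + s + 1) s
      = (List.range N).map (fun k : Nat => lo + s + s * (k : Int)) := by
    rw [PySem.List.pyRange_of_pos _ _ hs, if_pos (by omega)]
    have : (hi + s + 1 - (lo + s) + s - 1) = (hi + 1 - lo + s - 1) := by ring
    rw [this]
  rw [pvATail, hc, hb, ha]
  have hne : ∀ (f : Nat → Int), (List.range N).map f ≠ [] := by
    intro f h
    have := congrArg List.length h
    simp at this; omega
  simp only [List.length_map, List.length_range]
  -- turn the two pySetD's on each list into List.set
  have hset : ∀ (f : Nat → Int),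
      PySem.List.pySetD (PySem.List.pySetD ((List.range N).map f) 0 (-1)) (-1) (-1)
      = (((List.range N).map f).set 0 (-1)).set (N - 1) (-1) := by
    intro f
    rw [show ((0 : Int)) = ((0 : Nat) : Int) by norm_num, PySem.List.pySetD_natCast,
      pySetD_neg_one _ _ (by
        intro h
        have := congrArg List.length h
        simp at this; omega)]
    simp
  rw [hset, hset, hset, hset]
  apply List.ext_getElem
  · simp [pvModel]
  · intro k h1 h2
    simp only [pvModel, List.getElem_zip, List.getElem_set, List.getElem_map,
      List.getElem_range]
    have hkN : k < N := by simpa [pvModel] using h2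
    split_ifs <;> (try (exfalso; omega)) <;> simp only [Prod.mk.injEq] <;>
      and_intros <;> first | rfl | ring | trivial

theorem pvAlt_eq (lo hi s : Int) (hs : 0 < s) (hle : lo ≤ hi) :
    (PySem.List.enumerate (PySem.List.pyRange lo (hi + 1) s) 0).foldl
      (fun out ic =>
        out ++ [if ic.1 = 0 ∨ ic.1 = ((PySem.List.pyRange lo (hi + 1) s).length : Int) - 1
                then (ic.2, -1, -1, -1, -1)
                else (ic.2, ic.2 - s, ic.2 + s, lo, hi)]) []
    = pvModel lo hi s ((hi + 1 - lo + s - 1) / s).toNat := by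
  set N : Nat := ((hi + 1 - lo + s - 1) / s).toNat with hN
  have hN1 : 1 ≤ N := pvN_pos lo hi s hs hle
  have hc : PySem.List.pyRange lo (hi + 1) s
      = (List.range N).map (fun k : Nat => lo + s * (k : Int)) := by
    rw [PySem.List.pyRange_of_pos _ _ hs, if_pos (by omega)]
  rw [PySem.List.foldl_append_singleton_eq_map]
  rw [List.nil_append]
  apply List.ext_getElem
  · simp [pvModel, PySem.List.length_enumerate, hc]
  · intro k h1 h2
    have hkN : k < N := by
      simpa [PySem.List.length_enumerate, hc] using h1
    rw [List.getElem_map, PySem.List.getElem_enumerate]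
    simp only [pvModel, List.getElem_map, List.getElem_range, hc,
      List.length_map, List.length_range]
    have hcond : ((0 : Int) + k = 0 ∨ (0 : Int) + k = (N : Int) - 1)
        ↔ (k = 0 ∨ k = N - 1) := by omega
    rw [if_congr hcond rfl rfl]

-- ===== VERDICT (by name: the statement is the Claim_ definition above) =====
theorem get_nodes_along_edge_spec : Claim_equal_get_nodes_along_edge := by
  intro edge _
  unfold Spec_get_nodes_along_edge get_nodes_along_edge get_nodes_along_edge_alt
  have hle : min edge.1 edge.2 ≤ max edge.1 edge.2 := min_le_max
  by_cases h : 32 ≤ (edge.1 - edge.2).natAbs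
  · simp only [h, if_pos]
    rw [pvATail_eq _ _ 32 _ _ (by norm_num) hle (by ring) (by ring),
      pvAlt_eq _ _ 32 (by norm_num) hle]
  · simp only [h, if_neg, not_false_iff]
    rw [pvATail_eq _ _ 1 _ _ (by norm_num) hle (by ring) (by ring),
      pvAlt_eq _ _ 1 (by norm_num) hle]
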